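-- pv_equiv track=rewrite | github.com/edgar118/Auto-document-update | parte_1/ressolve.py | multiplies_numbers
-- ===== SOURCE A (Python) =====
-- def multiplies_numbers(input_value : str):
-- 	output = 1
-- 	n = ""
--
-- 	for i in input_value + " ":
-- 		if i.isnumeric():
-- 			n += i
-- 		else:
-- 			if n != "":
-- 				output *= int(n)
-- 			n = ""
--
-- 	return output
-- ===== SOURCE B (Python) =====
-- def multiplies_numbers(input_value: str):
--     # Index-based run scanner: find each maximal numeric run at once and
--     # multiply by the int of that slice, instead of accumulating char by char.
--     output = 1
--     i = 0
--     n = len(input_value)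
--     while i < n:
--         if input_value[i].isnumeric():
--             j = i
--             while j < n and input_value[j].isnumeric():
--                 j += 1
--             output *= int(input_value[i:j])
--             i = j
--         else:
--             i += 1
--     return output
-- ===== Notes on version B (the rewrite author's own statement) =====
-- stated objective: alternative
-- what changed: B scans each maximal numeric run with an index/inner-while and converts the whole slice at once, instead of A's char-by-char accumulator flushed by a trailing-space sentinel.
import Mathlib
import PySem

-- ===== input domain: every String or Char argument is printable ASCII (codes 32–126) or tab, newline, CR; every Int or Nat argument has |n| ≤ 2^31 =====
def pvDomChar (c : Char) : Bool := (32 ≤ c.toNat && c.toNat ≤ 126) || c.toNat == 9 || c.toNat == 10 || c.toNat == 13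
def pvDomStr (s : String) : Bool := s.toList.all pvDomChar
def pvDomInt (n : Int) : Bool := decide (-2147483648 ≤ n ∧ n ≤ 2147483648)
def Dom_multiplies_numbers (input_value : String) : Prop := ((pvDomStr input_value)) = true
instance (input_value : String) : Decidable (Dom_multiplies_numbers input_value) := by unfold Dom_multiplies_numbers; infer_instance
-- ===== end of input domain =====

-- B replaces A's char-by-char accumulator (flushed by a trailing-space sentinel) with an
-- index-free run scanner that takes each maximal numeric run at once (objective: alternative).

-- int(n): exact here since it is only applied to nonempty ASCII digit runs, where int() returns.
def pvIntOf (cs : List Char) : Int := (PySem.Int.ofChars? cs).getD 0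

-- ===== PORT A =====
-- i.isnumeric() ported as Char.isDigit: exact on the printable-ASCII domain Dom_.
def pvStepA (st : Int × List Char) (c : Char) : Int × List Char :=
  if c.isDigit then (st.1, st.2 ++ [c])
  else (if st.2 ≠ [] then st.1 * pvIntOf st.2 else st.1, [])

def multiplies_numbers (input_value : String) : Int :=
  (List.foldl pvStepA (1, []) (input_value.toList ++ [' '])).1

-- ===== PORT B =====
-- Source B's inner while collects the maximal numeric run input_value[i:j]; on lists that run is
-- takeWhile isDigit and 'i = j' is dropWhile isDigit; a non-numeric char advances i by one.
def pvAltGo : List Char → Int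
  | [] => 1
  | c :: cs =>
    if c.isDigit then
      pvIntOf (c :: cs.takeWhile Char.isDigit) * pvAltGo (cs.dropWhile Char.isDigit)
    else pvAltGo cs
termination_by l => l.length
decreasing_by
  · simpa using Nat.lt_succ_of_le (List.length_dropWhile_le _ _)
  · simp

def multiplies_numbers_alt (input_value : String) : Int := pvAltGo input_value.toList

-- ===== PRECONDITION & SPEC =====
def Spec_multiplies_numbers (input_value : String) (out : Int) : Prop := out = multiplies_numbers_alt input_value
instance (input_value : String) (out : Int) : Decidable (Spec_multiplies_numbers input_value out) := by unfold Spec_multiplies_numbers; infer_instance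

-- ===== CLAIM (what is proved, stated in full; the proofs are below) =====
def Claim_equal_multiplies_numbers : Prop := ∀ (input_value : String), Dom_multiplies_numbers input_value → Spec_multiplies_numbers input_value (multiplies_numbers input_value)

-- ===== LEMMAS AND PROOFS =====

-- P n l: A's remaining product once the pending digit run is n and the unread input is l
-- (with the trailing-' ' flush at the end).
def pvP (n : List Char) : List Char → Int
  | [] => if n = [] then 1 else pvIntOf n
  | c :: cs =>
    if c.isDigit then pvP (n ++ [c]) cs
    else (if n = [] then 1 else pvIntOf n) * pvP [] cs

theorem pvFoldA_eq_P (l : List Char) : ∀ (o : Int) (n : List Char),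
    (List.foldl pvStepA (o, n) (l ++ [' '])).1 = o * pvP n l := by
  induction l with
  | nil =>
    intro o n
    simp only [List.nil_append, List.foldl_cons, List.foldl_nil, pvStepA, pvP]
    norm_num
    split_ifs <;> simp_all
  | cons c cs ih =>
    intro o n
    by_cases h : c.isDigit
    · have hst : pvStepA (o, n) c = (o, n ++ [c]) := by simp [pvStepA, h]
      rw [List.cons_append, List.foldl_cons, hst, ih]
      simp [pvP, h]
    · have hst : pvStepA (o, n) c = (if n ≠ [] then o * pvIntOf n else o, []) := by
        simp [pvStepA, h]
      rw [List.cons_append, List.foldl_cons, hst, ih]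
      simp only [pvP, h, Bool.false_eq_true, if_false]
      split_ifs <;> simp_all [mul_assoc]

theorem pvP_append_digits (r : List Char) : ∀ (n rest : List Char),
    (∀ c ∈ r, c.isDigit) → pvP n (r ++ rest) = pvP (n ++ r) rest := by
  induction r with
  | nil => simp
  | cons c cs ih =>
    intro n rest h
    have hc : c.isDigit := h c (by simp)
    simp only [List.cons_append, pvP, hc, if_true]
    rw [ih (n ++ [c]) rest (fun d hd => h d (by simp [hd]))]
    simp

-- flushing a nonempty digit run when the next char (if any) is not a digit
theorem pvP_flush (run rest : List Char) (hne : run ≠ [])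
    (hrest : ∀ d ∈ rest.head?, d.isDigit = false) :
    pvP run rest = pvIntOf run * pvP [] rest := by
  cases rest with
  | nil => simp [pvP, hne]
  | cons d ds =>
    have hd : d.isDigit = false := hrest d (by simp)
    simp [pvP, hd, hne]

theorem pvAltGo_eq_P (l : List Char) : pvAltGo l = pvP [] l := by
  induction l using pvAltGo.induct with
  | case1 => simp [pvAltGo, pvP]
  | case2 c cs h ih =>
    rw [pvAltGo]
    simp only [h, if_true]
    have hsplit : cs.takeWhile Char.isDigit ++ cs.dropWhile Char.isDigit = cs :=
      List.takeWhile_append_dropWhile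
    have hrun : ∀ d ∈ c :: cs.takeWhile Char.isDigit, d.isDigit := by
      intro d hd
      rcases List.mem_cons.mp hd with h1 | h1
      · simpa [h1] using h
      · exact List.mem_takeWhile_imp h1
    have hhead : ∀ d ∈ (cs.dropWhile Char.isDigit).head?, d.isDigit = false := by
      intro d hd
      cases hcase : cs.dropWhile Char.isDigit with
      | nil => simp [hcase] at hd
      | cons e es =>
        rw [hcase] at hd
        simp only [List.head?_cons, Option.mem_some_iff] at hd
        subst hd
        have := List.head_dropWhile_not Char.isDigit (l := cs) (by simp [hcase])
        simpa [hcase] using this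
    calc pvIntOf (c :: cs.takeWhile Char.isDigit) * pvAltGo (cs.dropWhile Char.isDigit)
        = pvIntOf (c :: cs.takeWhile Char.isDigit) * pvP [] (cs.dropWhile Char.isDigit) := by
          rw [ih]
      _ = pvP (c :: cs.takeWhile Char.isDigit) (cs.dropWhile Char.isDigit) := by
          rw [pvP_flush (c :: cs.takeWhile Char.isDigit) _ (by simp) hhead]
      _ = pvP [] ((c :: cs.takeWhile Char.isDigit) ++ cs.dropWhile Char.isDigit) := by
          rw [pvP_append_digits _ [] _ hrun]; simp
      _ = pvP [] (c :: cs) := by rw [List.cons_append, hsplit]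
  | case3 c cs h ih =>
    rw [pvAltGo]
    simp only [h]
    rw [ih]
    simp [pvP, h]

-- ===== VERDICT (by name: the statement is the Claim_ definition above) =====
theorem multiplies_numbers_spec : Claim_equal_multiplies_numbers := by
  intro s _
  unfold Spec_multiplies_numbers multiplies_numbers multiplies_numbers_alt
  rw [pvFoldA_eq_P, pvAltGo_eq_P, one_mul]
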